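-- pv_equiv track=rewrite | github.com/sakethyalamanchili/My-DSA-Journey | basics/Pattern_Practice/exercise_12.py | generate_sandglass
-- ===== SOURCE A (Python) =====
-- def generate_sandglass(n):
--     result = []
--
--     for i in range(n):
--         stars = (2 * (n - i) - 1) * '*'
--         spaces = i * ' '
--         result.append(spaces + stars + spaces)
--
--     for i in range(1, n):
--         stars = (2 * i + 1) * '*'
--         spaces = (n - i - 1) * ' '
--         result.append(spaces + stars + spaces)
--
--     return result
-- ===== SOURCE B (Python) =====
-- def generate_sandglass(n):
--     top = [i * ' ' + (2 * (n - i) - 1) * '*' + i * ' ' for i in range(n)]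
--     return top + top[:-1][::-1]
-- ===== Notes on version B (the rewrite author's own statement) =====
-- stated objective: simpler
-- what changed: B builds only the top half with one loop/comprehension and obtains the bottom half by mirroring it (top + top[:-1][::-1]), replacing A's second independently-parameterised loop.
import Mathlib
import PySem

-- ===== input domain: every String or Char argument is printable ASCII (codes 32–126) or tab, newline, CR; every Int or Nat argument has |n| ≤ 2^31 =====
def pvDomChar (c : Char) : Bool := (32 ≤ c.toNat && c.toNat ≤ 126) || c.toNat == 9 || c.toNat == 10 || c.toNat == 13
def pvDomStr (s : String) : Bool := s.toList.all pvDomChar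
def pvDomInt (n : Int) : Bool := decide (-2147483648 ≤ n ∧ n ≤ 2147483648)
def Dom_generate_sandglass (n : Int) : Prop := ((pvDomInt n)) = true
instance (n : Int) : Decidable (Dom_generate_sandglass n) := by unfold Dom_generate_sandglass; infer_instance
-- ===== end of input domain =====

-- B builds only the top half with one loop and mirrors it for the bottom (top + top[:-1][::-1]); simpler decomposition, same values.

-- ===== PORT A =====
def generate_sandglass (n : Int) : List String :=
  let result : List String := []
  let result := (PySem.List.pyRange 0 n 1).foldl (fun res i =>
    let stars := PySem.List.pyRepeat ['*'] (2 * (n - i) - 1)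
    let spaces := PySem.List.pyRepeat [' '] i
    res ++ [String.ofList (spaces ++ stars ++ spaces)]) result
  let result := (PySem.List.pyRange 1 n 1).foldl (fun res i =>
    let stars := PySem.List.pyRepeat ['*'] (2 * i + 1)
    let spaces := PySem.List.pyRepeat [' '] (n - i - 1)
    res ++ [String.ofList (spaces ++ stars ++ spaces)]) result
  result

-- ===== PORT B =====
def generate_sandglass_alt (n : Int) : List String :=
  let top := (PySem.List.pyRange 0 n 1).map (fun i =>
    String.ofList (PySem.List.pyRepeat [' '] i ++ PySem.List.pyRepeat ['*'] (2 * (n - i) - 1)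
      ++ PySem.List.pyRepeat [' '] i))
  top ++ (PySem.List.slice top none (some (-1))).reverse

-- ===== PRECONDITION & SPEC =====
def Spec_generate_sandglass (n : Int) (out : List String) : Prop := out = generate_sandglass_alt n
instance (n : Int) (out : List String) : Decidable (Spec_generate_sandglass n out) := by unfold Spec_generate_sandglass; infer_instance

-- ===== CLAIM (what is proved, stated in full; the proofs are below) =====
def Claim_equal_generate_sandglass : Prop := ∀ (n : Int), Dom_generate_sandglass n → Spec_generate_sandglass n (generate_sandglass n)

-- ===== LEMMAS AND PROOFS =====

theorem generate_sandglass_mirror (n : Int) :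
    (PySem.List.pyRange 1 n 1).map (fun i =>
        String.ofList (PySem.List.pyRepeat [' '] (n - i - 1) ++ PySem.List.pyRepeat ['*'] (2 * i + 1)
          ++ PySem.List.pyRepeat [' '] (n - i - 1)))
      = (((PySem.List.pyRange 0 n 1).map (fun i =>
        String.ofList (PySem.List.pyRepeat [' '] i ++ PySem.List.pyRepeat ['*'] (2 * (n - i) - 1)
          ++ PySem.List.pyRepeat [' '] i))).dropLast).reverse := by
  rw [PySem.List.pyRange_one 1 n, PySem.List.pyRange_one 0 n, List.map_map, List.map_map,
    List.dropLast_eq_take, List.length_map, List.length_range, ← List.map_take, List.take_range]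
  apply List.ext_getElem
  · simp only [List.length_map, List.length_range, List.length_reverse]; omega
  · intro j h1 h2
    simp only [List.length_map, List.length_range, List.length_reverse] at h1 h2
    simp only [List.getElem_reverse, List.getElem_map, List.getElem_range, List.length_map,
      List.length_range, Function.comp]
    rw [PySem.List.pyRepeat_singleton, PySem.List.pyRepeat_singleton,
      PySem.List.pyRepeat_singleton, PySem.List.pyRepeat_singleton]
    have hi : (0 + ((min ((n - 0).toNat - 1) (n - 0).toNat - 1 - j : Nat) : Int)) = n - 2 - j := by
      omega
    rw [hi]
    have e1 : (n - (1 + (j : Int)) - 1).toNat = (n - 2 - (j : Int)).toNat := by omega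
    have e2 : (2 * (1 + (j : Int)) + 1).toNat = (2 * (n - (n - 2 - (j : Int))) - 1).toNat := by omega
    rw [e1, e2]

theorem slice_neg_one_eq_dropLast {α : Type} (xs : List α) :
    PySem.List.slice xs none (some (-1)) = xs.dropLast := by
  simp [pysem]

theorem generate_sandglass_agree (n : Int) :
    generate_sandglass n = generate_sandglass_alt n := by
  simp only [generate_sandglass, generate_sandglass_alt,
    PySem.List.foldl_append_singleton_eq_map, List.nil_append, slice_neg_one_eq_dropLast]
  rw [generate_sandglass_mirror n]

-- ===== VERDICT (by name: the statement is the Claim_ definition above) =====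
theorem generate_sandglass_spec : Claim_equal_generate_sandglass := by
  intro n _
  exact generate_sandglass_agree n
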